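-- pv_equiv track=rewrite | github.com/ownEyes/Rental-Recommendation-System-in-Singapore | app/services/Convert.py | amenities_to_vector
-- ===== SOURCE A (Python) =====
-- def amenities_to_vector(amenities_list):
--     reference_list = ['aircon', 'BBQ', 'gym', 'pool', 'dryer', 'Wifi', 'kitchen',
--                       'Backyard', 'TV', 'refrigerator', 'Microwave', 'Oven', 'Pets', 'stove', 'fan']
--     vector = [0] * len(reference_list)
--     amenity_mapping = {
--         'microwave': 'Microwave',
--         'pets': 'Pets',
--         'backyard': 'Backyard',
--         'oven': 'Oven',
--         'stoven': 'stove'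
--     }
--     for amenities in amenities_list:
--         for amenity in amenities:
--             standardized_amenity = amenity_mapping.get(amenity, amenity)
--             if standardized_amenity in reference_list:
--                 vector[reference_list.index(standardized_amenity)] = 1
--     return vector
-- ===== SOURCE B (Python) =====
-- def amenities_to_vector(amenities_list):
--     reference_list = ['aircon', 'BBQ', 'gym', 'pool', 'dryer', 'Wifi', 'kitchen',
--                       'Backyard', 'TV', 'refrigerator', 'Microwave', 'Oven', 'Pets', 'stove', 'fan']
--     amenity_mapping = {
--         'microwave': 'Microwave',
--         'pets': 'Pets',
--         'backyard': 'Backyard',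
--         'oven': 'Oven',
--         'stoven': 'stove'
--     }
--
--     def seen(ref):
--         return any(amenity_mapping.get(amenity, amenity) == ref
--                    for amenities in amenities_list for amenity in amenities)
--
--     return [1 if seen(ref) else 0 for ref in reference_list]
-- ===== Notes on version B (the rewrite author's own statement) =====
-- stated objective: alternative
-- what changed: Replaces A's scatter-writes into a mutable vector (membership test + list.index scan per amenity) with a gather: for each fixed reference position an existence scan over the input decides the bit, so no vector is mutated and no index lookup occurs.
import Mathlib
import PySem

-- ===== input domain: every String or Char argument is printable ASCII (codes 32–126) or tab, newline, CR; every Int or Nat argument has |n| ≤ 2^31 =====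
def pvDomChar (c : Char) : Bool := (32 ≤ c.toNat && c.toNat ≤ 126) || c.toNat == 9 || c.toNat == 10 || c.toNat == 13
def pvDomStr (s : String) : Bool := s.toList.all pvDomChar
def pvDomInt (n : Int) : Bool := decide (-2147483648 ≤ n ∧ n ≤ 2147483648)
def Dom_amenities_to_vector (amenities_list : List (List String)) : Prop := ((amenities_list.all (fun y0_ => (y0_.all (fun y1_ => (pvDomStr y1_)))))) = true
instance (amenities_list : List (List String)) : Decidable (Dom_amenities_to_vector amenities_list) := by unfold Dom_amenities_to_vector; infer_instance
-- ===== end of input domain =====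

-- B replaces A's scatter-writes into a mutable vector (membership test + list.index per amenity)
-- with a gather: one existence scan over the input per fixed reference position (alternative).

-- ===== PORT A =====
def amenities_to_vector (amenities_list : List (List String)) : List Int :=
  let reference_list : List String := ["aircon", "BBQ", "gym", "pool", "dryer", "Wifi", "kitchen",
      "Backyard", "TV", "refrigerator", "Microwave", "Oven", "Pets", "stove", "fan"]
  let vector : List Int := List.replicate reference_list.length 0
  let amenity_mapping : PySem.Dict String String :=
    PySem.Dict.mk [("microwave", "Microwave"), ("pets", "Pets"), ("backyard", "Backyard"),
     ("oven", "Oven"), ("stoven", "stove")]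
  amenities_list.foldl (fun vector amenities =>
    amenities.foldl (fun vector amenity =>
      let standardized_amenity := PySem.Dict.getD amenity_mapping amenity amenity
      if standardized_amenity ∈ reference_list then
        match PySem.List.index? reference_list standardized_amenity with
        | some i => vector.set i 1
        | none => vector          -- unreachable: guarded by the membership test (Python .index)
      else vector) vector) vector

-- ===== PORT B =====
def pvBSeen (amenities_list : List (List String)) (ref : String) : Bool :=
  amenities_list.any (fun amenities =>
    amenities.any (fun amenity =>
      PySem.Dict.getD (PySem.Dict.mk [("microwave", "Microwave"), ("pets", "Pets"),
        ("backyard", "Backyard"), ("oven", "Oven"), ("stoven", "stove")]) amenity amenity == ref))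

def amenities_to_vector_alt (amenities_list : List (List String)) : List Int :=
  ["aircon", "BBQ", "gym", "pool", "dryer", "Wifi", "kitchen",
   "Backyard", "TV", "refrigerator", "Microwave", "Oven", "Pets", "stove", "fan"].map
    (fun ref => if pvBSeen amenities_list ref then (1 : Int) else 0)

-- ===== PRECONDITION & SPEC =====
def Spec_amenities_to_vector (amenities_list : List (List String)) (out : List Int) : Prop := out = amenities_to_vector_alt amenities_list
instance (amenities_list : List (List String)) (out : List Int) : Decidable (Spec_amenities_to_vector amenities_list out) := by unfold Spec_amenities_to_vector; infer_instance

-- ===== CLAIM =====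
def Claim_equal_amenities_to_vector : Prop := ∀ (amenities_list : List (List String)), Dom_amenities_to_vector amenities_list → Spec_amenities_to_vector amenities_list (amenities_to_vector amenities_list)

-- ===== LEMMAS AND PROOFS =====

def pvRefs : List String := ["aircon", "BBQ", "gym", "pool", "dryer", "Wifi", "kitchen",
    "Backyard", "TV", "refrigerator", "Microwave", "Oven", "Pets", "stove", "fan"]

def pvMap : PySem.Dict String String :=
  PySem.Dict.mk [("microwave", "Microwave"), ("pets", "Pets"), ("backyard", "Backyard"),
   ("oven", "Oven"), ("stoven", "stove")]

def pvStd (a : String) : String := PySem.Dict.getD pvMap a a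

-- indicator vector of a boolean predicate over the reference list
def pvInd (p : String → Bool) (r : String) : Int := if p r then 1 else 0

-- A's inner-loop body
def pvStep (vector : List Int) (amenity : String) : List Int :=
  let standardized_amenity := pvStd amenity
  if standardized_amenity ∈ pvRefs then
    match PySem.List.index? pvRefs standardized_amenity with
    | some i => vector.set i 1
    | none => vector
  else vector

-- one step of A on an indicator vector marks exactly the standardized amenity
theorem pvStep_ind (p : String → Bool) (a : String) :
    pvStep (pvRefs.map (pvInd p)) a = pvRefs.map (pvInd (fun r => p r || (pvStd a == r))) := by
  unfold pvStep
  by_cases hmem : pvStd a ∈ pvRefs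
  · simp only [hmem, if_true]
    rcases Option.isSome_iff_exists.mp ((PySem.List.index?_isSome_iff pvRefs (pvStd a)).mpr hmem) with ⟨k, hk⟩
    rw [hk]
    rcases PySem.List.getElem_of_index?_eq_some hk with ⟨hklt, hkeq, _⟩
    have hnodup : pvRefs.Nodup := by decide
    apply List.ext_getElem
    · simp
    · intro j hj1 hj2
      have hjlt : j < pvRefs.length := by simpa using hj2
      by_cases hjk : j = k
      · subst hjk
        simp [pvInd, hkeq]
      · have hne : pvRefs[j] ≠ pvStd a := by
          intro h
          exact hjk (List.Nodup.getElem_inj_iff hnodup |>.mp (h.trans hkeq.symm))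
        have hne' : (pvStd a == pvRefs[j]) = false := by
          simp only [beq_eq_false_iff_ne]; exact fun h => hne h.symm
        simp [Ne.symm hjk, pvInd, hne']
  · simp only [hmem, if_false]
    apply List.map_congr_left
    intro r hr
    have hne : (pvStd a == r) = false := by
      simp only [beq_eq_false_iff_ne]; exact fun h => hmem (h ▸ hr)
    simp [pvInd, hne]

-- folding A's step over a flat list of amenities accumulates the existence predicate
theorem pvFold_ind (xs : List String) (p : String → Bool) :
    xs.foldl pvStep (pvRefs.map (pvInd p)) =
      pvRefs.map (pvInd (fun r => p r || xs.any (fun a => pvStd a == r))) := by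
  induction xs generalizing p with
  | nil => simp
  | cons x xs ih =>
    rw [List.foldl_cons, pvStep_ind, ih]
    apply List.map_congr_left
    intro r _
    simp [pvInd, Bool.or_assoc]

theorem pvA_eq (L : List (List String)) :
    amenities_to_vector L =
      pvRefs.map (pvInd (fun r => (L.flatten).any (fun a => pvStd a == r))) := by
  have hinit : (List.replicate pvRefs.length (0 : Int)) = pvRefs.map (pvInd (fun _ => false)) := by
    decide
  have h0 : amenities_to_vector L =
      L.foldl (fun v row => row.foldl pvStep v) (List.replicate pvRefs.length (0 : Int)) := rfl
  rw [h0, hinit, ← List.foldl_flatten, pvFold_ind]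
  simp

theorem pvB_eq (L : List (List String)) :
    amenities_to_vector_alt L =
      pvRefs.map (pvInd (fun r => (L.flatten).any (fun a => pvStd a == r))) := by
  unfold amenities_to_vector_alt
  apply List.map_congr_left
  intro r _
  unfold pvBSeen pvInd
  simp [List.any_flatten, pvStd, pvMap]

-- ===== VERDICT =====
theorem amenities_to_vector_spec : Claim_equal_amenities_to_vector := by
  intro L _
  show amenities_to_vector L = amenities_to_vector_alt L
  rw [pvA_eq, pvB_eq]
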